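-- pv_equiv track=rewrite | github.com/kavinstewart/agentbay | app/services/terminal_emulator.py | _ensure_crlf
-- ===== SOURCE A (Python) =====
-- def _ensure_crlf(raw_text: str) -> str:
--     # Terminals typically move to column 0 on CR; tmux capture may only include LF.
--     if not raw_text:
--         return raw_text
--     chars: list[str] = []
--     prev = ""
--     for ch in raw_text:
--         if ch == "\n" and prev != "\r":
--             chars.append("\r\n")
--         else:
--             chars.append(ch)
--         prev = ch
--     return "".join(chars)
-- ===== SOURCE B (Python) =====
-- def _ensure_crlf(raw_text: str) -> str:
--     # Normalize existing CRLF to LF, then give every LF exactly one preceding CR.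
--     return raw_text.replace("\r\n", "\n").replace("\n", "\r\n")
-- ===== Notes on version B (the rewrite author's own statement) =====
-- stated objective: faster
-- what changed: Replaced the char-by-char state machine (prev-character tracking with a list accumulator and join) by two str.replace passes: collapse every CRLF to LF, then expand every LF to CRLF.
import Mathlib
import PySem

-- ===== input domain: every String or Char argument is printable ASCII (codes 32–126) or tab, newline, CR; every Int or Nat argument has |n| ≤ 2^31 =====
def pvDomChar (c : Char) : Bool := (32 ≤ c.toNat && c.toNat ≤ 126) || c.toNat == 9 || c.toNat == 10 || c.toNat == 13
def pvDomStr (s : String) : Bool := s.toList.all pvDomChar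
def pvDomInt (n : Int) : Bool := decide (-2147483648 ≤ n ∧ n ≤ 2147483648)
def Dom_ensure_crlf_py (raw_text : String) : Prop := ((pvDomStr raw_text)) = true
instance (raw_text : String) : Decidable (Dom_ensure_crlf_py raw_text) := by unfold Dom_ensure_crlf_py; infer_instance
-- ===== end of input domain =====

-- B replaces A's char-by-char prev-tracking state machine with two str.replace passes
-- (collapse CRLF to LF, then expand LF to CRLF) — more idiomatic, same O(n) cost.

-- ===== PORT A =====
-- literal port: fold over the characters carrying (chars accumulator, prev), then "".join
def ensure_crlf_py (raw_text : String) : String :=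
  if raw_text = "" then raw_text
  else
    let st := raw_text.toList.foldl
      (fun (p : List String × String) ch =>
        ((if ch = '\n' ∧ p.2 ≠ "\r" then p.1 ++ ["\r\n"] else p.1 ++ [String.singleton ch]),
         String.singleton ch))
      ([], "")
    PySem.Str.join "" st.1

-- ===== PORT B =====
def ensure_crlf_py_alt (raw_text : String) : String :=
  PySem.Str.replace (PySem.Str.replace raw_text "\r\n" "\n") "\n" "\r\n"

-- ===== PRECONDITION & SPEC =====
def Spec_ensure_crlf_py (raw_text : String) (out : String) : Prop := out = ensure_crlf_py_alt raw_text
instance (raw_text : String) (out : String) : Decidable (Spec_ensure_crlf_py raw_text out) := by unfold Spec_ensure_crlf_py; infer_instance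

-- ===== CLAIM (what is proved, stated in full; the proofs are below) =====
def Claim_equal_ensure_crlf_py : Prop := ∀ (raw_text : String), Dom_ensure_crlf_py raw_text → Spec_ensure_crlf_py raw_text (ensure_crlf_py raw_text)

-- ===== LEMMAS AND PROOFS =====

-- what replace s "\r\n" "\n" computes, as a plain recursion
def pvNorm : List Char → List Char
  | [] => []
  | c :: t => if c = '\r' ∧ t.head? = some '\n' then '\n' :: pvNorm t.tail else c :: pvNorm t
termination_by l => l.length
decreasing_by
  · simp [List.length_tail]
  · simp

-- what replace s "\n" "\r\n" computes, as a plain recursion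
def pvExpand : List Char → List Char
  | [] => []
  | c :: t => if c = '\n' then '\r' :: '\n' :: pvExpand t else c :: pvExpand t

-- A's character stream, state = "previous char was CR"
def pvA (b : Bool) : List Char → List Char
  | [] => []
  | c :: t => (if c = '\n' ∧ b = false then ['\r', '\n'] else [c]) ++ pvA (c == '\r') t

lemma head_of_head? {t : List Char} {c : Char} (h : t.head? = some c) : ∃ r, t = c :: r := by
  cases t with
  | nil => simp at h
  | cons a r => exact ⟨r, by simpa using h⟩

lemma go_crlf : ∀ (fuel : Nat) (l acc : List Char), l.length ≤ fuel →
    PySem.Chars.replace.go ['\r','\n'] ['\n'] fuel l acc = acc.reverse ++ pvNorm l := by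
  intro fuel
  induction fuel with
  | zero =>
    intro l acc h
    have : l = [] := List.eq_nil_of_length_eq_zero (Nat.le_zero.mp h)
    subst this; simp [PySem.Chars.replace.go, pvNorm]
  | succ n ih =>
    intro l acc h
    cases l with
    | nil => simp [PySem.Chars.replace.go, pvNorm]
    | cons c t =>
      rw [PySem.Chars.replace.go.eq_def]
      simp only []
      by_cases hp : List.isPrefixOf ['\r','\n'] (c :: t) = true
      · rw [if_pos hp]
        obtain ⟨rest, hrest⟩ := List.isPrefixOf_iff_prefix.mp hp
        have hrest' : '\r' :: '\n' :: rest = c :: t := hrest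
        obtain ⟨hc1, ht⟩ := List.cons.inj hrest'
        subst hc1
        subst ht
        rw [show List.drop (['\r','\n'] : List Char).length ('\r' :: '\n' :: rest) = rest from rfl]
        rw [ih rest (['\n'].reverse ++ acc) (by simp at h ⊢; omega)]
        rw [pvNorm, if_pos ⟨rfl, rfl⟩]
        simp
      · rw [if_neg hp]
        rw [ih t (c :: acc) (by simp at h ⊢; omega)]
        have hnot : ¬ (c = '\r' ∧ t.head? = some '\n') := by
          intro ⟨h1, h2⟩
          subst h1
          obtain ⟨r, rfl⟩ := head_of_head? h2
          exact hp (by simp [List.isPrefixOf])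
        rw [pvNorm, if_neg hnot]
        simp

lemma go_lf : ∀ (fuel : Nat) (l acc : List Char), l.length ≤ fuel →
    PySem.Chars.replace.go ['\n'] ['\r','\n'] fuel l acc = acc.reverse ++ pvExpand l := by
  intro fuel
  induction fuel with
  | zero =>
    intro l acc h
    have : l = [] := List.eq_nil_of_length_eq_zero (Nat.le_zero.mp h)
    subst this; simp [PySem.Chars.replace.go, pvExpand]
  | succ n ih =>
    intro l acc h
    cases l with
    | nil => simp [PySem.Chars.replace.go, pvExpand]
    | cons c t =>
      rw [PySem.Chars.replace.go.eq_def]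
      simp only []
      by_cases hp : List.isPrefixOf ['\n'] (c :: t) = true
      · obtain ⟨rest, hrest⟩ := List.isPrefixOf_iff_prefix.mp hp
        have hrest' : '\n' :: rest = c :: t := hrest
        obtain ⟨hc1, ht⟩ := List.cons.inj hrest'
        rw [if_pos hp]
        subst hc1
        rw [show List.drop (['\n'] : List Char).length ('\n' :: t) = t from rfl]
        rw [ih t (['\r','\n'].reverse ++ acc) (by simp at h ⊢; omega)]
        rw [pvExpand, if_pos rfl]
        simp
      · have hc : ¬ c = '\n' := by
          intro h1; subst h1; exact hp (by simp [List.isPrefixOf])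
        rw [if_neg hp]
        rw [ih t (c :: acc) (by simp at h ⊢; omega)]
        rw [pvExpand, if_neg hc]
        simp

lemma replace_crlf (s : List Char) :
    PySem.Chars.replace s ['\r','\n'] ['\n'] = pvNorm s := by
  rw [PySem.Chars.replace]
  simp [go_crlf s.length s [] (le_refl _)]

lemma replace_lf (s : List Char) :
    PySem.Chars.replace s ['\n'] ['\r','\n'] = pvExpand s := by
  rw [PySem.Chars.replace]
  simp [go_lf s.length s [] (le_refl _)]

-- B's toList
lemma alt_toList (s : String) :
    (ensure_crlf_py_alt s).toList = pvExpand (pvNorm s.toList) := by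
  simp [ensure_crlf_py_alt, PySem.Str.toList_replace]
  rw [replace_crlf, replace_lf]

-- if the first char is not '\n', the incoming CR flag is irrelevant
lemma pvA_flag (b b' : Bool) : ∀ (l : List Char), l.head? ≠ some '\n' → pvA b l = pvA b' l := by
  intro l hl
  cases l with
  | nil => rfl
  | cons c t =>
    have hc : ¬ c = '\n' := by intro h; exact hl (by simp [h])
    rw [pvA, pvA, if_neg (by simp [hc]), if_neg (by simp [hc])]

-- the state machine equals normalize-then-expand
lemma pvA_eq : ∀ (n : Nat) (l : List Char), l.length ≤ n → pvA false l = pvExpand (pvNorm l) := by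
  intro n
  induction n with
  | zero =>
    intro l h
    have : l = [] := List.eq_nil_of_length_eq_zero (Nat.le_zero.mp h)
    subst this; simp [pvA, pvNorm, pvExpand]
  | succ n ih =>
    intro l h
    cases l with
    | nil => simp [pvA, pvNorm, pvExpand]
    | cons c t =>
      by_cases hn : c = '\n'
      · subst hn
        rw [pvA, if_pos ⟨rfl, rfl⟩, pvNorm, if_neg (by simp), pvExpand, if_pos rfl,
            show ('\n' == '\r') = false from rfl, ih t (by simp at h ⊢; omega)]
        rfl
      · by_cases hr : c = '\r'
        · subst hr
          rw [pvA, if_neg (by simp), pvNorm,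
              show ('\r' == '\r') = true from rfl]
          by_cases ht : t.head? = some '\n'
          · obtain ⟨r, rfl⟩ := head_of_head? ht
            rw [if_pos ⟨rfl, rfl⟩]
            simp only [List.tail_cons]
            rw [pvExpand, if_pos rfl, pvA, if_neg (by simp),
                show ('\n' == '\r') = false from rfl, ih r (by simp at h ⊢; omega)]
            rfl
          · rw [if_neg (by simp [ht]), pvExpand, if_neg (by decide),
                pvA_flag true false t ht, ih t (by simp at h ⊢; omega)]
            rfl
        · rw [pvA, if_neg (by simp [hn]), pvNorm, if_neg (by simp [hr]), pvExpand, if_neg hn,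
              show (c == '\r') = false from by simp [hr], ih t (by simp at h ⊢; omega)]
          rfl

-- A's fold produces the accumulated pieces of the prev-machine
def pvPieces (prev : String) : List Char → List String
  | [] => []
  | c :: t => (if c = '\n' ∧ prev ≠ "\r" then "\r\n" else String.singleton c) :: pvPieces (String.singleton c) t

lemma foldA : ∀ (l : List Char) (chars : List String) (prev : String),
    (l.foldl (fun (p : List String × String) ch =>
        ((if ch = '\n' ∧ p.2 ≠ "\r" then p.1 ++ ["\r\n"] else p.1 ++ [String.singleton ch]),
         String.singleton ch)) (chars, prev)).1 = chars ++ pvPieces prev l := by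
  intro l
  induction l with
  | nil => intro chars prev; simp [pvPieces]
  | cons c t ih =>
    intro chars prev
    rw [List.foldl_cons, pvPieces]
    by_cases hc : c = '\n' ∧ prev ≠ "\r"
    · simp only [if_pos hc, ih]; simp
    · simp only [if_neg hc, ih]; simp

lemma singleton_eq_cr (c : Char) : (String.singleton c = "\r") ↔ c = '\r' := by
  constructor
  · intro h
    have := congrArg String.toList h
    simpa [String.singleton] using this
  · intro h; subst h; rfl

-- flattening the pieces gives the char-level machine
lemma pieces_flatten : ∀ (l : List Char) (prev : String),
    ((pvPieces prev l).map String.toList).flatten = pvA (prev == "\r") l := by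
  intro l
  induction l with
  | nil => intro prev; rfl
  | cons c t ih =>
    intro prev
    rw [pvPieces, pvA, List.map_cons, List.flatten_cons, ih]
    have h1 : (String.singleton c == "\r") = (c == '\r') := by
      by_cases hc : c = '\r'
      · subst hc; rfl
      · simp [singleton_eq_cr, hc]
    by_cases hc : c = '\n' ∧ prev ≠ "\r"
    · rw [if_pos hc, if_pos ⟨hc.1, by simp [hc.2]⟩, h1]
      rfl
    · rw [if_neg hc]
      have h2 : ¬ (c = '\n' ∧ (prev == "\r") = false) := by
        intro ⟨ha, hb⟩
        exact hc ⟨ha, by simpa using hb⟩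
      rw [if_neg h2, h1]
      simp [String.singleton]

lemma join_empty_flatten (parts : List String) :
    (PySem.Str.join "" parts).toList = (parts.map String.toList).flatten := by
  rw [PySem.Str.toList_join]
  show PySem.Chars.join [] _ = _
  rw [PySem.Chars.join]
  induction (parts.map String.toList) with
  | nil => rfl
  | cons a t ih =>
    cases t with
    | nil => simp [List.intercalate]
    | cons b r =>
      simp [List.intercalate] at ih ⊢
      simpa using ih

-- ===== VERDICT (by name: the statement is the Claim_ definition above) =====
theorem ensure_crlf_py_spec : Claim_equal_ensure_crlf_py := by
  intro raw_text _
  show ensure_crlf_py raw_text = ensure_crlf_py_alt raw_text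
  rw [← String.toList_inj, alt_toList]
  by_cases h0 : raw_text = ""
  · subst h0
    simp [ensure_crlf_py, pvNorm, pvExpand]
  · rw [ensure_crlf_py, if_neg h0]
    simp only []
    rw [join_empty_flatten, foldA, List.nil_append, pieces_flatten]
    rw [show (("" : String) == "\r") = false from rfl]
    rw [pvA_eq raw_text.toList.length raw_text.toList (le_refl _)]
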